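-- pv_equiv track=rewrite | github.com/BIH-CEI/ERKER2Phenopackets | ERKER2Phenopackets/src/utils/ParallelizationUtils.py | calc_chunk_size
-- ===== SOURCE A (Python) =====
-- from typing import List
--
-- def calc_chunk_size(num_instances: int, num_chunks: int) -> List[int]:
--     """
--     Calculate chunk sizes for even workload distribution.
--     :param num_instances: Number of instances or rows
--     :type num_instances: int
--     :param num_chunks: Number of chunks
--     :type num_chunks: int
--     :return: List of chunk sizes
--     :rtype: List[int]
--     :raises ValueError: If num_chunks or num_instance is 0
--     """
--     if num_chunks == 0 or num_instances == 0:
--         raise ValueError("num_chunks and num_instances must be greater than 0")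
--
--     chunk_size = num_instances // num_chunks
--     remainder = num_instances % num_chunks
--
--     # remainder is necessarily smaller than num_chunks
--     # therefore, we can just add 1 to the first remainder number of chunks
--     chunk_sizes = [
--         chunk_size + 1 if i < remainder else chunk_size for i in range(num_chunks)
--     ]
--     return chunk_sizes
-- ===== SOURCE B (Python) =====
-- from typing import List
--
-- def calc_chunk_size(num_instances: int, num_chunks: int) -> List[int]:
--     if num_chunks == 0 or num_instances == 0:
--         raise ValueError("num_chunks and num_instances must be greater than 0")
--     sizes = []
--     n, k = num_instances, num_chunks
--     while k > 0:
--         c = -(-n // k)  # ceiling division: next chunk gets its fair share, rounded up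
--         sizes.append(c)
--         n -= c
--         k -= 1
--     return sizes
-- ===== Notes on version B (the rewrite author's own statement) =====
-- stated objective: alternative
-- what changed: Replaces the divmod-and-per-index 'i < remainder' comprehension by a greedy peeling loop: repeatedly emit ceil(n/k) for the remaining work n and remaining chunks k, subtracting as it goes; no remainder is ever computed or compared.
import Mathlib
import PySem

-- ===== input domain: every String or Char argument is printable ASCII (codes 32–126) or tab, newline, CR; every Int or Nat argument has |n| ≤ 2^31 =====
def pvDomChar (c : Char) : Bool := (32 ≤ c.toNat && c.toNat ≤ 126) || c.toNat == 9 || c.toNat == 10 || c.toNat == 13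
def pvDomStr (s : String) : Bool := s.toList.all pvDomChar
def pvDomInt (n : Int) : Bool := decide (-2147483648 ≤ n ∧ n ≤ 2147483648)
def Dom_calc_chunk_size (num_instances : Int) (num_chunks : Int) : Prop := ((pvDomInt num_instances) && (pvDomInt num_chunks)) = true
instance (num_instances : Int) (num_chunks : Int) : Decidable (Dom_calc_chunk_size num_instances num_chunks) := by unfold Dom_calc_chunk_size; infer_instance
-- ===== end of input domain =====

-- B distributes by greedy peeling (emit ceil(n/k), subtract, decrement k) instead of A's divmod + per-index 'i < remainder' branch; objective: alternative.


-- ===== PORT A =====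
-- the 'raise ValueError' branch is excluded by Pre_calc_chunk_size
def calc_chunk_size (num_instances : Int) (num_chunks : Int) : List Int :=
  let chunk_size := PySem.Int.floordiv num_instances num_chunks
  let remainder := PySem.Int.mod num_instances num_chunks
  (PySem.List.pyRange 0 num_chunks 1).map
    (fun i => if i < remainder then chunk_size + 1 else chunk_size)

-- ===== PORT B =====
-- the while loop: emit ceil(n/k) = -((-n)//k), subtract it from n, decrement k
def chunkLoop (n : Int) (k : Int) : List Int :=
  if h : 0 < k then
    let c := -(PySem.Int.floordiv (-n) k)
    c :: chunkLoop (n - c) (k - 1)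
  else []
termination_by k.toNat
decreasing_by omega

def calc_chunk_size_alt (num_instances : Int) (num_chunks : Int) : List Int :=
  chunkLoop num_instances num_chunks

-- ===== PRECONDITION & SPEC =====
-- A raises ValueError when num_chunks == 0 or num_instances == 0
def Pre_calc_chunk_size (num_instances : Int) (num_chunks : Int) : Prop :=
  num_chunks ≠ 0 ∧ num_instances ≠ 0
instance (num_instances : Int) (num_chunks : Int) : Decidable (Pre_calc_chunk_size num_instances num_chunks) := by
  unfold Pre_calc_chunk_size; infer_instance

def pvWitness_calc_chunk_size : Int × Int := (10, 3)

def Spec_calc_chunk_size (num_instances : Int) (num_chunks : Int) (out : List Int) : Prop := out = calc_chunk_size_alt num_instances num_chunks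
instance (num_instances : Int) (num_chunks : Int) (out : List Int) : Decidable (Spec_calc_chunk_size num_instances num_chunks out) := by unfold Spec_calc_chunk_size; infer_instance

-- ===== CLAIM =====
def Claim_equal_calc_chunk_size : Prop := ∀ (num_instances : Int) (num_chunks : Int), Dom_calc_chunk_size num_instances num_chunks → Pre_calc_chunk_size num_instances num_chunks → Spec_calc_chunk_size num_instances num_chunks (calc_chunk_size num_instances num_chunks)

-- ===== LEMMAS AND PROOFS =====

-- map over range with an 'index < m' branch splits into two replicated blocks
lemma range_ite_split (a b : Int) (m n : Nat) (hmn : m ≤ n) :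
    (List.map (fun k : Nat => (k : Int)) (List.range n)).map (fun i => if i < (m : Int) then a else b)
      = List.replicate m a ++ List.replicate (n - m) b := by
  rw [List.map_map, show n = m + (n - m) by omega, List.range_add, List.map_append, List.map_map]
  congr 1
  · refine (List.eq_replicate_iff.mpr ⟨by simp, ?_⟩)
    intro x hx
    obtain ⟨k, hk, rfl⟩ := List.mem_map.mp hx
    have : k < m := List.mem_range.mp hk
    simp only [Function.comp]
    rw [if_pos (by exact_mod_cast this)]
  · refine (List.eq_replicate_iff.mpr ⟨by simp, ?_⟩)
    intro x hx
    obtain ⟨k, hk, rfl⟩ := List.mem_map.mp hx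
    simp only [Function.comp]
    rw [if_neg (by push_cast; omega)]

-- peeling an exact multiple yields m equal chunks
lemma chunkLoop_mul (m : Nat) (q : Int) : chunkLoop (q * m) m = List.replicate m q := by
  induction m with
  | zero => rw [chunkLoop]; simp
  | succ m ih =>
    have hpos : (0:Int) < ((m+1 : Nat) : Int) := by push_cast; omega
    have hc : -(PySem.Int.floordiv (-(q * ((m+1:Nat):Int))) ((m+1:Nat):Int)) = q := by
      rw [PySem.Int.neg_floordiv_neg_eq_iff_of_pos hpos]
      constructor
      · have : (q - 1) * ((m+1:Nat):Int) = q * ((m+1:Nat):Int) - ((m+1:Nat):Int) := by ring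
        linarith
      · linarith
    rw [chunkLoop]
    simp only [dif_pos hpos, hc]
    have : q * ((m+1:Nat):Int) - q = q * (m:Int) := by push_cast; ring
    rw [this, show ((m+1:Nat):Int) - 1 = ((m:Nat):Int) by push_cast; ring, ih]
    simp [List.replicate_succ]

-- the peeling loop produces r chunks of q+1 followed by m-r chunks of q
lemma chunkLoop_eq (m : Nat) : ∀ (n q r : Int), n = q * m + r → 0 ≤ r → r < m →
    chunkLoop n m = List.replicate r.toNat (q+1) ++ List.replicate ((m:Int) - r).toNat q := by
  induction m with
  | zero => intro n q r _ h0 hlt; simp at hlt; omega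
  | succ m ih =>
    intro n q r hn h0 hlt
    have hpos : (0:Int) < ((m+1 : Nat) : Int) := by push_cast; omega
    by_cases hr : 0 < r
    · -- next chunk is q+1; remaining work is q*m + (r-1) over m chunks
      have hc : -(PySem.Int.floordiv (-n) ((m+1:Nat):Int)) = q + 1 := by
        rw [PySem.Int.neg_floordiv_neg_eq_iff_of_pos hpos]
        constructor
        · have : (q + 1 - 1) * ((m+1:Nat):Int) = q * ((m+1:Nat):Int) := by ring
          rw [this, hn]; push_cast; nlinarith
        · rw [hn]
          have : (q + 1) * ((m+1:Nat):Int) = q * ((m+1:Nat):Int) + ((m+1:Nat):Int) := by ring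
          rw [this]
          have : r ≤ ((m+1:Nat):Int) := by push_cast at hlt ⊢; omega
          linarith
      rw [chunkLoop]
      simp only [dif_pos hpos, hc]
      have hm : 0 < m := by
        by_contra h
        have : m = 0 := by omega
        subst this; push_cast at hlt; omega
      have hn' : n - (q + 1) = q * (m:Int) + (r - 1) := by
        rw [hn]; push_cast; ring
      rw [show ((m+1:Nat):Int) - 1 = ((m:Nat):Int) by push_cast; ring]
      rw [ih (n - (q+1)) q (r-1) hn' (by omega) (by push_cast at hlt ⊢; omega)]
      rw [show r.toNat = (r-1).toNat + 1 by omega,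
          show ((m+1:Nat):Int) - r = ((m:Nat):Int) - (r-1) by push_cast; ring]
      simp [List.replicate_succ]
    · -- r = 0: next chunk is q; remaining work is the exact multiple q*m
      have hr0 : r = 0 := by omega
      subst hr0
      have hc : -(PySem.Int.floordiv (-n) ((m+1:Nat):Int)) = q := by
        rw [PySem.Int.neg_floordiv_neg_eq_iff_of_pos hpos]
        constructor
        · have : (q - 1) * ((m+1:Nat):Int) = q * ((m+1:Nat):Int) - ((m+1:Nat):Int) := by ring
          rw [this, hn]; linarith
        · rw [hn]; linarith
      rw [chunkLoop]
      simp only [dif_pos hpos, hc]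
      have : n - q = q * (m:Int) := by rw [hn]; push_cast; ring
      rw [this, show ((m+1:Nat):Int) - 1 = ((m:Nat):Int) by push_cast; ring, chunkLoop_mul]
      rw [show ((0:Int)).toNat = 0 by rfl, show (((m+1:Nat):Int) - 0).toNat = m + 1 by omega]
      simp [List.replicate_succ]

-- ===== VERDICT =====
theorem calc_chunk_size_spec : Claim_equal_calc_chunk_size := by
  intro ni nc _ hpre
  obtain ⟨hc, -⟩ := hpre
  unfold Spec_calc_chunk_size calc_chunk_size_alt
  simp only [calc_chunk_size]
  rcases lt_or_gt_of_ne hc with hneg | hpos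
  · -- num_chunks < 0: A's range is empty and B's loop never runs
    rw [PySem.List.pyRange_one_eq_nil (by omega), chunkLoop, dif_neg (by omega), List.map_nil]
  · have h0 : 0 ≤ PySem.Int.mod ni nc := PySem.Int.mod_nonneg (a := ni) hpos
    have hlt : PySem.Int.mod ni nc < nc := PySem.Int.mod_lt (a := ni) hpos
    have hdm : PySem.Int.floordiv ni nc * nc + PySem.Int.mod ni nc = ni :=
      PySem.Int.floordiv_mul_add_mod ni nc
    rw [PySem.List.pyRange_one]
    simp only [sub_zero, zero_add]
    have key := range_ite_split (PySem.Int.floordiv ni nc + 1) (PySem.Int.floordiv ni nc)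
      (PySem.Int.mod ni nc).toNat nc.toNat (by omega)
    rw [Int.toNat_of_nonneg h0] at key
    rw [key]
    have hB := chunkLoop_eq nc.toNat ni (PySem.Int.floordiv ni nc) (PySem.Int.mod ni nc)
      (by rw [Int.toNat_of_nonneg (le_of_lt hpos)]; omega) h0
      (by rw [Int.toNat_of_nonneg (le_of_lt hpos)]; omega)
    rw [show ((nc.toNat : Nat) : Int) = nc by omega] at hB
    rw [hB, show nc.toNat - (PySem.Int.mod ni nc).toNat = (nc - PySem.Int.mod ni nc).toNat by omega]
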